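-- pv_equiv track=rewrite | github.com/hyunji12/Algorithm_study | 4307_1.py | solution
-- ===== SOURCE A (Python) =====
-- def solution(L, list):
--     answer = []
--
--     min_l = []
--     max_l = []
--     for i in range(len(list)):
--         if list[i] > L-list[i]:
--             min_l.append(L-list[i])
--             max_l.append(list[i])
--         else:
--             min_l.append(list[i])
--             max_l.append(L-list[i])
--
--     min_l.sort(reverse=True)
--     max_l.sort(reverse=True)
--
--     answer.append(min_l[0])
--     answer.append(max_l[0])
--     return answer
-- ===== SOURCE B (Python) =====
-- def solution(L, list):
--     # One O(n) pass per answer component: running maxima, no lists built, no sort.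
--     best_min = max(min(x, L - x) for x in list)
--     best_max = max(max(x, L - x) for x in list)
--     return [best_min, best_max]
-- ===== Notes on version B (the rewrite author's own statement) =====
-- stated objective: faster
-- what changed: B replaces A's building of two auxiliary lists followed by two descending sorts with running maxima of min(x,L-x) and max(x,L-x), so the sort disappears entirely.
import Mathlib
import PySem

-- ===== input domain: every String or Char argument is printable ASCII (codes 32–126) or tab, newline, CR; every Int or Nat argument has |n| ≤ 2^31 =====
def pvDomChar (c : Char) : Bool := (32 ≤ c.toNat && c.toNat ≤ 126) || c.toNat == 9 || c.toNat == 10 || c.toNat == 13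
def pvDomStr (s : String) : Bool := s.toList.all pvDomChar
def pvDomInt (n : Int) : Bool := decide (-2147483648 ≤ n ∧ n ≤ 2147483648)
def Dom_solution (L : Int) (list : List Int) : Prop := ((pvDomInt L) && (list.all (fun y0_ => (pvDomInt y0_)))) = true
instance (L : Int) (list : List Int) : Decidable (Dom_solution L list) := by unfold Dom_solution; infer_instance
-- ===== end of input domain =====

-- B drops A's two list builds + two descending sorts and keeps running maxima instead (O(n) vs O(n log n)).

-- ===== PORT A =====
def solution (L : Int) (list : List Int) : List Int :=
  -- for i in range(len(list)): append min/max split to min_l / max_l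
  let p := (PySem.List.pyRange 0 (PySem.List.len list) 1).foldl
    (fun (p : List Int × List Int) i =>
      let x := PySem.List.pyGetD list i 0   -- list[i]; i is always in range here
      if x > L - x then (p.1 ++ [L - x], p.2 ++ [x])
      else (p.1 ++ [x], p.2 ++ [L - x]))
    ([], [])
  let min_s := PySem.List.sorted p.1 (fun y => y) true
  let max_s := PySem.List.sorted p.2 (fun y => y) true
  match PySem.List.pyGet? min_s 0, PySem.List.pyGet? max_s 0 with
  | some a, some b => [a, b]
  | _, _ => []   -- min_l[0] on the empty list: IndexError, excluded by Pre_solution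

-- ===== PORT B =====
def solution_alt (L : Int) (list : List Int) : List Int :=
  match list with
  | [] => []   -- max() of an empty generator: ValueError, excluded by Pre_solution
  | x :: xs =>
      [xs.foldl (fun m y => max m (min y (L - y))) (min x (L - x)),
       xs.foldl (fun m y => max m (max y (L - y))) (max x (L - x))]

-- ===== PRECONDITION & SPEC =====
-- A raises IndexError (and B ValueError) on the empty list; Pre_ excludes exactly that.
def Pre_solution (L : Int) (list : List Int) : Prop := list ≠ []
instance (L : Int) (list : List Int) : Decidable (Pre_solution L list) := by unfold Pre_solution; infer_instance
def pvWitness_solution : Int × List Int := (10, [3, 8])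

def Spec_solution (L : Int) (list : List Int) (out : List Int) : Prop := out = solution_alt L list
instance (L : Int) (list : List Int) (out : List Int) : Decidable (Spec_solution L list out) := by unfold Spec_solution; infer_instance

-- ===== CLAIM (what is proved, stated in full; the proofs are below) =====
def Claim_equal_solution : Prop := ∀ (L : Int) (list : List Int), Dom_solution L list → Pre_solution L list → Spec_solution L list (solution L list)

-- ===== LEMMAS AND PROOFS =====

-- the head of a descending sort (key = id) of a nonempty list is its running max
theorem head_sorted_rev_eq_foldl_max (a : Int) (t : List Int) :
    PySem.List.pyGet? (PySem.List.sorted (a :: t) (fun y => y) true) 0 = some (t.foldl max a) := by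
  have hperm := PySem.List.sorted_perm (a :: t) (fun y : Int => y) true
  have hne : PySem.List.sorted (a :: t) (fun y : Int => y) true ≠ [] := by
    intro h
    have h0 := hperm.length_eq
    simp [h] at h0
  obtain ⟨m, rest, hm⟩ := List.exists_cons_of_ne_nil hne
  have hge := PySem.List.key_head_sorted_rev_ge (xs := a :: t) (key := fun y : Int => y) hm
  have hmem : m ∈ a :: t := by
    have : m ∈ PySem.List.sorted (a :: t) (fun y : Int => y) true := by simp [hm]
    exact (PySem.List.mem_sorted _ _ _ _).1 this
  have hF := PySem.List.le_foldl_max t a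
  have hFmem := PySem.List.foldl_max_mem t a
  have h1 : m ≤ t.foldl max a := by
    rcases List.mem_cons.1 hmem with h | h
    · rw [h]; exact hF.1
    · exact hF.2 m h
  have h2 : t.foldl max a ≤ m := by
    rcases hFmem with h | h
    · rw [h]; simpa using hge a (List.mem_cons_self)
    · simpa using hge _ (List.mem_cons_of_mem a h)
  rw [hm, PySem.List.pyGet?_zero_cons, le_antisymm h1 h2]

-- A's index loop over range(len(list)) appending the two split values builds exactly
-- the two mapped lists
theorem loop_builds_maps (L : Int) (list : List Int) :
    (PySem.List.pyRange 0 (PySem.List.len list) 1).foldl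
      (fun (p : List Int × List Int) i =>
        let x := PySem.List.pyGetD list i 0
        if x > L - x then (p.1 ++ [L - x], p.2 ++ [x])
        else (p.1 ++ [x], p.2 ++ [L - x]))
      ([], [])
    = (list.map (fun x => min x (L - x)), list.map (fun x => max x (L - x))) := by
  refine (PySem.List.foldl_pyRange_zero_pyGetD list 0
      (fun (p : List Int × List Int) x =>
        if x > L - x then (p.1 ++ [L - x], p.2 ++ [x])
        else (p.1 ++ [x], p.2 ++ [L - x])) ([], [])).trans ?_
  induction list using List.reverseRecOn with
  | nil => simp
  | append_singleton xs x ih =>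
      rw [List.foldl_append, ih]
      simp only [List.foldl_cons, List.foldl_nil, List.map_append, List.map_cons, List.map_nil]
      by_cases h : x > L - x
      · simp [h, min_def, max_def, le_of_lt h]
      · have h' : x ≤ L - x := not_lt.1 h
        simp [h, min_def, max_def, h']

theorem foldl_max_map (f : Int → Int) (c : Int) (xs : List Int) :
    (xs.map f).foldl max c = xs.foldl (fun m y => max m (f y)) c := by
  induction xs generalizing c with
  | nil => rfl
  | cons a t ih => simp only [List.map_cons, List.foldl_cons]; exact ih _

-- ===== VERDICT (by name: the statement is the Claim_ definition above) =====
theorem solution_spec : Claim_equal_solution := by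
  intro L list _ hpre
  unfold Spec_solution solution
  obtain ⟨x, xs, rfl⟩ := List.exists_cons_of_ne_nil hpre
  simp only [loop_builds_maps]
  rw [show (x :: xs).map (fun y => min y (L - y)) = min x (L - x) :: xs.map (fun y => min y (L - y)) from rfl,
      show (x :: xs).map (fun y => max y (L - y)) = max x (L - x) :: xs.map (fun y => max y (L - y)) from rfl,
      head_sorted_rev_eq_foldl_max, head_sorted_rev_eq_foldl_max]
  simp only [foldl_max_map, solution_alt]
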